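-- pv_equiv track=rewrite | github.com/facebookresearch/diplomacy_searchbot | fairdiplomacy/agents/base_search_agent.py | are_supports_coordinated
-- ===== SOURCE A (Python) =====
-- from typing import List, Tuple, Set, Dict, Union, Sequence
--
-- def are_supports_coordinated(orders: List[str]) -> bool:
--     """Return False if any supports or convoys are not properly coordinated
--
--     e.g. if "F BLA S A SEV - RUM", return False if "A SEV" is not ordered "A SEV - RUM"
--              0  1  2 3  4  5  6
--     """
--     required = {}
--     ordered = {}
--
--     for order in orders:
--         split = order.split()
--         ordered[split[1]] = split  # save by location
--         if split[2] in ("S", "C"):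
--             if split[4] in required and required[split[4]] != split[3:]:
--                 # an order is already required of this unit, but it contradicts this one
--                 return False
--             else:
--                 required[split[4]] = split[3:]
--
--     for req_loc, req_order in required.items():
--         if req_loc not in ordered:
--             # supporting a foreign unit is always allowed, since we can't
--             # control the coordination
--             continue
--
--         actual_order = ordered[req_loc]
--
--         if len(req_order) == 2 and actual_order[2] == "-":
--             # we supported a hold, but it tried to move
--             return False
--         elif (
--             len(req_order) > 2
--             and req_order[2] == "-"
--             and (actual_order[2] != "-" or actual_order[3] != req_order[3])
--         ):
--             # we supported a move, but the order given was (1) not a move, or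
--             # (2) a move to the wrong destination
--             return False
--
--     # checks passed, return True
--     return True
-- ===== SOURCE B (Python) =====
-- def are_supports_coordinated(orders):
--     """Return False if any supports or convoys are not properly coordinated.
--
--     Brute-force pairwise check: no dictionaries at all."""
--     splits = [order.split() for order in orders]
--     supports = [s for s in splits if s[2] in ("S", "C")]
--
--     for s in supports:
--         # any other support/convoy requiring something contradictory of the same unit?
--         for t in supports:
--             if t[4] == s[4] and t[3:] != s[3:]:
--                 return False
--
--         # the actual order of the supported unit = last order given at that location
--         actual = None
--         for u in splits:
--             if u[1] == s[4]:
--                 actual = u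
--         if actual is None:
--             # supporting a foreign unit is always allowed
--             continue
--
--         req = s[3:]
--         if len(req) == 2 and actual[2] == "-":
--             # we supported a hold, but it tried to move
--             return False
--         if len(req) > 2 and req[2] == "-" and (actual[2] != "-" or actual[3] != req[3]):
--             # we supported a move, but the order was not that move
--             return False
--     return True
-- ===== Notes on version B (the rewrite author's own statement) =====
-- stated objective: alternative
-- what changed: B drops both dictionaries entirely and does a brute-force pairwise scan: for each support/convoy order it scans all support orders for a contradictory requirement on the same unit and scans the whole order list for the last order at the supported location, then applies the hold/move checks; A instead builds 'required' and 'ordered' dicts in one pass and verifies in a second dict-driven pass.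
-- outside the precondition, e.g. on are_supports_coordinated(['A GAS S A BRE - PIC', 'A GAS S A BRE H', 'Q']): A returns False, B raises IndexError
import Mathlib
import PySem

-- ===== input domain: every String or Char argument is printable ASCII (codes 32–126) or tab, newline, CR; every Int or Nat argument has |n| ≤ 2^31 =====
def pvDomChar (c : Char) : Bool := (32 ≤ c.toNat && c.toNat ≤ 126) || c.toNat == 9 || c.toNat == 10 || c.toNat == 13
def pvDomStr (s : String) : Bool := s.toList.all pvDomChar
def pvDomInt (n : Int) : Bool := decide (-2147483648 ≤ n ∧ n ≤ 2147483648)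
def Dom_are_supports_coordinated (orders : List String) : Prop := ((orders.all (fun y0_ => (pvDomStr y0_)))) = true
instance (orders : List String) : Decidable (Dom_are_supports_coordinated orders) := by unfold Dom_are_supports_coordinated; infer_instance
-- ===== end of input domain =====

-- B replaces A's two dictionaries (required/ordered) by a brute-force pairwise scan over the
-- parsed orders — no dict at all; objective: alternative algorithm (O(n^2) instead of O(n)).

-- ===== PORT A =====
-- first loop of A: builds `required` and `ordered`; `none` = the early `return False` on a contradiction.
-- indexing split[i] is ported as .getD i "" — Pre_ guarantees every index A reads is in range.
def ascLoop1 (orders : List String) (required ordered : PySem.Dict String (List String)) :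
    Option (PySem.Dict String (List String) × PySem.Dict String (List String)) :=
  match orders with
  | [] => some (required, ordered)
  | order :: rest =>
    let split := PySem.Str.split₀ order
    let ordered := ordered.insert (split.getD 1 "") split
    if split.getD 2 "" == "S" || split.getD 2 "" == "C" then
      if required.contains (split.getD 4 "") && required.getD (split.getD 4 "") [] != split.drop 3 then
        none
      else
        ascLoop1 rest (required.insert (split.getD 4 "") (split.drop 3)) ordered
    else
      ascLoop1 rest required ordered

-- second loop of A over required.items; `false` = the early `return False`.
def ascLoop2 (items : List (String × List String)) (ordered : PySem.Dict String (List String)) : Bool :=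
  match items with
  | [] => true
  | (reqLoc, reqOrder) :: rest =>
    match ordered.get? reqLoc with
    | none => ascLoop2 rest ordered
    | some actualOrder =>
      if reqOrder.length == 2 && actualOrder.getD 2 "" == "-" then false
      else if decide (2 < reqOrder.length) && reqOrder.getD 2 "" == "-" &&
          (actualOrder.getD 2 "" != "-" || actualOrder.getD 3 "" != reqOrder.getD 3 "") then false
      else ascLoop2 rest ordered

def are_supports_coordinated (orders : List String) : Bool :=
  match ascLoop1 orders PySem.Dict.empty PySem.Dict.empty with
  | none => false
  | some (required, ordered) => ascLoop2 required.items ordered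

-- ===== PORT B =====
-- B's inner loop `actual = None; for u in splits: if u[1] == loc: actual = u` — last order at loc.
def bLastAt (splits : List (List String)) (loc : String) : Option (List String) :=
  splits.foldl (fun acc u => if u.getD 1 "" == loc then some u else acc) none

def are_supports_coordinated_alt (orders : List String) : Bool :=
  let splits := orders.map PySem.Str.split₀
  let sup := splits.filter (fun s => s.getD 2 "" == "S" || s.getD 2 "" == "C")
  sup.all (fun s =>
    if sup.any (fun t => t.getD 4 "" == s.getD 4 "" && t.drop 3 != s.drop 3) then false
    else
      match bLastAt splits (s.getD 4 "") with
      | none => true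
      | some actual =>
        if (s.drop 3).length == 2 && actual.getD 2 "" == "-" then false
        else if decide (2 < (s.drop 3).length) && (s.drop 3).getD 2 "" == "-" &&
            (actual.getD 2 "" != "-" || actual.getD 3 "" != (s.drop 3).getD 3 "") then false
        else true)

-- ===== PRECONDITION & SPEC =====
-- Pre_ restricts to inputs on which neither Python raises an IndexError: every order has >= 3
-- tokens (>= 5 for a support/convoy), and no support of a move is so short that checking the
-- supported unit's own move order (the LAST order at that location) would read a missing token.
-- A still returns False on some excluded inputs (an early contradiction or an earlier violated
-- requirement makes A return before the bad index is reached) — see the cites in the claim.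
def ascWF (o : String) : Bool :=
  decide (2 < (PySem.Str.split₀ o).length) &&
    (!((PySem.Str.split₀ o).getD 2 "" == "S" || (PySem.Str.split₀ o).getD 2 "" == "C") ||
      decide (4 < (PySem.Str.split₀ o).length))

def ascDanger (orders : List String) (o : String) : Bool :=
  ((PySem.Str.split₀ o).getD 2 "" == "S" || (PySem.Str.split₀ o).getD 2 "" == "C") &&
  decide (5 < (PySem.Str.split₀ o).length) && (PySem.Str.split₀ o).getD 5 "" == "-" &&
  (match orders.reverse.find?
      (fun u => (PySem.Str.split₀ u).getD 1 "" == (PySem.Str.split₀ o).getD 4 "") with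
   | none => false
   | some u => (PySem.Str.split₀ u).getD 2 "" == "-" &&
       !(decide (6 < (PySem.Str.split₀ o).length) && decide (3 < (PySem.Str.split₀ u).length)))

def Pre_are_supports_coordinated (orders : List String) : Prop :=
  (orders.all ascWF && !(orders.any (ascDanger orders))) = true

instance (orders : List String) : Decidable (Pre_are_supports_coordinated orders) := by
  unfold Pre_are_supports_coordinated; infer_instance

def pvWitness_are_supports_coordinated : List String :=
  ["F KIE S A RUH - MUN", "A RUH - MUN", "A BER H"]

def Spec_are_supports_coordinated (orders : List String) (out : Bool) : Prop :=
  out = are_supports_coordinated_alt orders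
instance (orders : List String) (out : Bool) : Decidable (Spec_are_supports_coordinated orders out) := by
  unfold Spec_are_supports_coordinated; infer_instance

-- ===== CLAIM (what is proved, stated in full; the proofs are below) =====
def Claim_equal_are_supports_coordinated : Prop := ∀ (orders : List String), Dom_are_supports_coordinated orders → Pre_are_supports_coordinated orders → Spec_are_supports_coordinated orders (are_supports_coordinated orders)

-- ===== LEMMAS AND PROOFS =====
def ascSC (s : List String) : Bool := s.getD 2 "" == "S" || s.getD 2 "" == "C"
def ascPairs (L : List (List String)) : List (String × List String) :=
  (L.filter ascSC).map (fun s => (s.getD 4 "", s.drop 3))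
def ascConsB (X : List (String × List String)) : Bool :=
  X.all (fun p => X.all (fun q => !(p.1 == q.1) || p.2 == q.2))
def ascOk (O : PySem.Dict String (List String)) (p : String × List String) : Bool :=
  match O.get? p.1 with
  | none => true
  | some actual =>
    if p.2.length == 2 && actual.getD 2 "" == "-" then false
    else if decide (2 < p.2.length) && p.2.getD 2 "" == "-" &&
        (actual.getD 2 "" != "-" || actual.getD 3 "" != p.2.getD 3 "") then false
    else true
def pReq (L : List (List String)) (req : PySem.Dict String (List String)) :
    Option (PySem.Dict String (List String)) :=
  match L with
  | [] => some req
  | s :: rest =>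
    if ascSC s then
      if req.contains (s.getD 4 "") && req.getD (s.getD 4 "") [] != s.drop 3 then none
      else pReq rest (req.insert (s.getD 4 "") (s.drop 3))
    else pReq rest req
theorem ascConsB_iff (X : List (String × List String)) :
    ascConsB X = true ↔ ∀ p ∈ X, ∀ q ∈ X, p.1 = q.1 → p.2 = q.2 := by
  simp only [ascConsB, List.all_eq_true, Bool.or_eq_true, Bool.not_eq_eq_eq_not, Bool.not_true,
    beq_eq_false_iff_ne, ne_eq, beq_iff_eq]
  constructor
  · intro h p hp q hq hpq
    rcases h p hp q hq with h1 | h1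
    · exact absurd hpq h1
    · exact h1
  · intro h p hp q hq
    by_cases hpq : p.1 = q.1
    · exact Or.inr (h p hp q hq hpq)
    · exact Or.inl hpq
theorem asc_all_congr_mem {α : Type} (f : α → Bool) {X Y : List α}
    (h : ∀ p, p ∈ X ↔ p ∈ Y) : X.all f = Y.all f := by
  cases hx : X.all f <;> cases hy : Y.all f <;> try rfl
  · rw [List.all_eq_false] at hx
    rw [List.all_eq_true] at hy
    obtain ⟨p, hp, hf⟩ := hx
    exact absurd (hy p ((h p).mp hp)) (by simp [hf])
  · rw [List.all_eq_true] at hx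
    rw [List.all_eq_false] at hy
    obtain ⟨p, hp, hf⟩ := hy
    exact absurd (hx p ((h p).mpr hp)) (by simp [hf])

theorem ascMain (O : PySem.Dict String (List String)) (L : List (List String)) :
    ∀ (P : List (String × List String)) (req : PySem.Dict String (List String)),
    req.keys.Nodup → (∀ p : String × List String, p ∈ req.items ↔ p ∈ P) → ascConsB P = true →
    (match pReq L req with | none => false | some R => R.items.all (ascOk O))
      = (ascConsB (P ++ ascPairs L) && (P ++ ascPairs L).all (ascOk O)) := by
  induction L with
  | nil =>
    intro P req hnd hmem hP
    simp only [pReq, ascPairs, List.filter_nil, List.map_nil, List.append_nil, hP, Bool.true_and]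
    exact asc_all_congr_mem _ hmem
  | cons s rest ih =>
    intro P req hnd hmem hP
    by_cases hsc : ascSC s = true
    · have hpairs : ascPairs (s :: rest) = (s.getD 4 "", s.drop 3) :: ascPairs rest := by
        simp [ascPairs, List.filter_cons, hsc]
      rw [hpairs]
      simp only [pReq, hsc, if_true]
      by_cases hc : (req.contains (s.getD 4 "") && req.getD (s.getD 4 "") [] != s.drop 3) = true
      · -- contradiction: both sides false
        rw [if_pos hc]
        rw [Bool.and_eq_true, bne_iff_ne] at hc
        obtain ⟨hcon, hne⟩ := hc
        have hsome : (req.get? (s.getD 4 "")).isSome := by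
          rw [← PySem.Dict.contains_eq_isSome_get?]; exact hcon
        obtain ⟨w, hw⟩ := Option.isSome_iff_exists.mp hsome
        have hwP : (s.getD 4 "", w) ∈ P := (hmem _).mp (PySem.Dict.mem_items_of_get?_eq_some req hw)
        have hwv : w ≠ s.drop 3 := by
          rw [PySem.Dict.getD_eq_get?_getD, hw] at hne; exact hne
        have hcons : ascConsB (P ++ (s.getD 4 "", s.drop 3) :: ascPairs rest) = false := by
          rw [Bool.eq_false_iff, Ne, ascConsB_iff]
          intro h
          exact hwv (h _ (List.mem_append_left _ hwP) _
            (List.mem_append_right _ List.mem_cons_self) rfl)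
        rw [hcons, Bool.false_and]
      · rw [if_neg hc]
        have hc' : req.contains (s.getD 4 "") = false ∨ req.getD (s.getD 4 "") [] = s.drop 3 := by
          rcases Bool.and_eq_false_iff.mp (Bool.eq_false_iff.mpr hc) with h | h
          · exact Or.inl h
          · exact Or.inr (by simpa using h)
        have key : ∀ w, (s.getD 4 "", w) ∈ P → w = s.drop 3 := by
          intro w hwP
          have hwit : (s.getD 4 "", w) ∈ req.items := (hmem _).mpr hwP
          have hget : req.get? (s.getD 4 "") = some w := PySem.Dict.get?_of_mem_items req hwit hnd
          rcases hc' with h | h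
          · rw [PySem.Dict.contains_eq_isSome_get?, hget] at h; simp at h
          · rw [PySem.Dict.getD_eq_get?_getD, hget] at h; exact h
        have hnd' := PySem.Dict.nodup_keys_insert req (s.getD 4 "") (s.drop 3) hnd
        have hmem' : ∀ p : String × List String,
            p ∈ (req.insert (s.getD 4 "") (s.drop 3)).items ↔ p ∈ P ++ [(s.getD 4 "", s.drop 3)] := by
          intro p
          rw [PySem.Dict.mem_items_insert, List.mem_append, List.mem_singleton]
          constructor
          · rintro (rfl | ⟨hp, _⟩)
            · exact Or.inr rfl
            · exact Or.inl ((hmem p).mp hp)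
          · rintro (hp | rfl)
            · by_cases hk : p.1 = s.getD 4 ""
              · obtain ⟨a, b⟩ := p
                simp only at hk
                subst hk
                exact Or.inl (by rw [key b hp])
              · exact Or.inr ⟨(hmem p).mpr hp, hk⟩
            · exact Or.inl rfl
        have hP' : ascConsB (P ++ [(s.getD 4 "", s.drop 3)]) = true := by
          rw [ascConsB_iff]
          rw [ascConsB_iff] at hP
          intro p hp q hq hpq
          rw [List.mem_append, List.mem_singleton] at hp hq
          rcases hp with hp | rfl <;> rcases hq with hq | rfl
          · exact hP p hp q hq hpq
          · obtain ⟨a, b⟩ := p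
            simp only at hpq
            subst hpq
            exact key b hp
          · obtain ⟨a, b⟩ := q
            simp only at hpq
            subst hpq
            exact (key b hq).symm
          · rfl
        have := ih (P ++ [(s.getD 4 "", s.drop 3)]) _ hnd' hmem' hP'
        rw [this, List.append_assoc, List.singleton_append]
    · have hpairs : ascPairs (s :: rest) = ascPairs rest := by
        simp [ascPairs, List.filter_cons, hsc]
      rw [hpairs]
      simp only [pReq, hsc, if_false]
      exact ih P req hnd hmem hP

theorem asc_all_congr {α : Type} {l : List α} {f g : α → Bool}
    (h : ∀ x ∈ l, f x = g x) : l.all f = l.all g := by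
  induction l with
  | nil => rfl
  | cons a t ih =>
    simp only [List.all_cons, h a List.mem_cons_self,
      ih (fun x hx => h x (List.mem_cons_of_mem a hx))]

theorem ascOrd_get? (L : List (List String)) (d : PySem.Dict String (List String)) (k : String) :
    (L.foldl (fun d s => d.insert (s.getD 1 "") s) d).get? k
      = L.foldl (fun acc u => if u.getD 1 "" == k then some u else acc) (d.get? k) := by
  induction L generalizing d with
  | nil => rfl
  | cons s rest ih =>
    simp only [List.foldl_cons]
    rw [ih]
    congr 1
    rw [PySem.Dict.get?_insert]
    by_cases h : k = s.getD 1 ""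
    · simp [h]
    · have hb : (s.getD 1 "" == k) = false := beq_eq_false_iff_ne.mpr (fun hh => h hh.symm)
      rw [if_neg h, hb]
      simp

theorem ascAlt_eq (orders : List String) :
    are_supports_coordinated_alt orders =
      (ascConsB (ascPairs (orders.map PySem.Str.split₀)) &&
        (ascPairs (orders.map PySem.Str.split₀)).all
          (ascOk ((orders.map PySem.Str.split₀).foldl
            (fun d s => d.insert (s.getD 1 "") s) PySem.Dict.empty))) := by
  set L := orders.map PySem.Str.split₀ with hL
  set O := L.foldl (fun d s => d.insert (s.getD 1 "") s) PySem.Dict.empty with hO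
  have hlast : ∀ loc, bLastAt L loc = O.get? loc := by
    intro loc
    rw [hO, ascOrd_get? L PySem.Dict.empty loc, PySem.Dict.get?_empty]
    rfl
  have hsup : L.filter (fun s => s.getD 2 "" == "S" || s.getD 2 "" == "C") = L.filter ascSC := rfl
  unfold are_supports_coordinated_alt
  simp only [← hL, hsup]
  by_cases hc : ascConsB (ascPairs L) = true
  · -- consistent: every per-s conflict scan comes up empty
    rw [hc, Bool.true_and]
    have hnoc : ∀ s ∈ L.filter ascSC,
        (L.filter ascSC).any (fun t => t.getD 4 "" == s.getD 4 "" && t.drop 3 != s.drop 3) = false := by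
      intro s hs
      rw [List.any_eq_false]
      intro t ht
      rw [ascConsB_iff] at hc
      rw [Bool.not_eq_true]
      show (t.getD 4 "" == s.getD 4 "" && t.drop 3 != s.drop 3) = false
      by_cases h4 : t.getD 4 "" = s.getD 4 ""
      · have heq := hc (t.getD 4 "", t.drop 3) (by rw [ascPairs]; exact List.mem_map_of_mem ht)
          (s.getD 4 "", s.drop 3) (by rw [ascPairs]; exact List.mem_map_of_mem hs) h4
        simp only at heq
        rw [h4, heq]
        simp
      · exact Bool.and_eq_false_iff.mpr (Or.inl (beq_eq_false_iff_ne.mpr h4))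
    have : (ascPairs L).all (ascOk O) =
        (L.filter ascSC).all (fun s => ascOk O (s.getD 4 "", s.drop 3)) := by
      rw [ascPairs, List.all_map]
      rfl
    rw [this]
    apply asc_all_congr
    intro s hs
    rw [hnoc s hs, if_neg (by simp), hlast]
    rfl
  · -- inconsistent: some support sees a conflicting requirement
    rw [Bool.eq_false_iff.mpr hc, Bool.false_and]
    have hcf : ¬ (∀ p ∈ ascPairs L, ∀ q ∈ ascPairs L, p.1 = q.1 → p.2 = q.2) :=
      fun h => hc ((ascConsB_iff _).mpr h)
    push_neg at hcf
    obtain ⟨p, hp, q, hq, hpq1, hpq2⟩ := hcf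
    obtain ⟨t, ht, rfl⟩ := List.mem_map.mp hp
    obtain ⟨s, hs, rfl⟩ := List.mem_map.mp hq
    rw [List.all_eq_false]
    refine ⟨s, hs, ?_⟩
    have : (L.filter ascSC).any (fun t' => t'.getD 4 "" == s.getD 4 "" && t'.drop 3 != s.drop 3) = true := by
      rw [List.any_eq_true]
      exact ⟨t, ht, by simp only at hpq1 hpq2; rw [hpq1]; simp [bne_iff_ne, hpq2]⟩
    rw [this]
    simp

theorem ascLoop2_eq_all (items : List (String × List String)) (O : PySem.Dict String (List String)) :
    ascLoop2 items O = items.all (ascOk O) := by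
  induction items with
  | nil => rfl
  | cons p rest ih =>
    obtain ⟨k, v⟩ := p
    simp only [ascLoop2, ascOk, List.all_cons]
    cases hO : O.get? k with
    | none => simpa using ih
    | some actual =>
      simp only [Option.some.injEq]
      split_ifs with h1 h2 <;> simp [h1, ih] <;> simp [h2]

-- port-A decomposition lemma: ascLoop1 in terms of pReq and the `ordered` fold
theorem ascLoop1_eq (orders : List String) (req ord : PySem.Dict String (List String)) :
    ascLoop1 orders req ord =
      (pReq (orders.map PySem.Str.split₀) req).map
        (fun r => (r, (orders.map PySem.Str.split₀).foldl (fun d s => d.insert (s.getD 1 "") s) ord)) := by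
  induction orders generalizing req ord with
  | nil => rfl
  | cons o rest ih =>
    simp only [ascLoop1, List.map_cons, pReq, ascSC, List.foldl_cons]
    split
    · split
      · rfl
      · exact ih _ _
    · exact ih _ _

-- ===== VERDICT (by name: the statement is the Claim_ definition above) =====
theorem are_supports_coordinated_spec : Claim_equal_are_supports_coordinated := by
  intro orders _ _
  unfold Spec_are_supports_coordinated are_supports_coordinated
  rw [ascLoop1_eq, ascAlt_eq]
  have h := ascMain ((orders.map PySem.Str.split₀).foldl (fun d s => d.insert (s.getD 1 "") s) PySem.Dict.empty)
      (orders.map PySem.Str.split₀) [] PySem.Dict.empty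
      PySem.Dict.nodup_keys_empty (by intro p; simp [PySem.Dict.empty]) rfl
  simp only [List.nil_append] at h
  rw [← h]
  cases pReq (orders.map PySem.Str.split₀) PySem.Dict.empty with
  | none => rfl
  | some R => simp [ascLoop2_eq_all]
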